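-- pv_equiv track=rewrite | github.com/frcepeda/Contest-Archive | Code Jam/Round 2 2020/IHOP.py | solve
-- ===== SOURCE A (Python) =====
-- def tri(a, b):
--     a -= 1
--     return b*(b+1)//2 - a*(a+1)//2
--
-- def even(a, b):
--     a -= 1
--     a //= 2
--     b //= 2
--     return b*(b+1) - a*(a+1)
--
-- def odd(a, b):
--     return tri(a, b) - even(a, b)
--
-- def tribsearch(x):
--     lo, hi = 0, 5*10**9
--     while lo < hi:
--         mid = (lo + hi)//2
--         if tri(1, mid) >= x:
--             hi = mid
--         else:
--             lo = mid + 1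
--     return hi
--
-- def solve(L, R):
--     swapped = False
--     if L < R:
--         L, R = R, L
--         swapped = True
--
--     steps = 0
--     delta = L - R
--     k = tribsearch(delta)
--
--     steps += k
--     L -= tri(1, k)
--
--     if L < R or (L == R and swapped):
--         L, R = R, L
--         swapped ^= True
--
--     def fL(x):
--         if steps % 2 == 0:
--             return odd(steps+1, x)
--         else:
--             return even(steps+1, x)
--
--     def fR(x):
--         if steps % 2 == 1:
--             return odd(steps+1, x)
--         else:
--             return even(steps+1, x)
--
--     lo, hi = 0, 5*10**9
--     while lo < hi:
--         mid = (lo + hi)//2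
--         if fL(mid) > L or fR(mid) > R:
--             hi = mid
--         else:
--             lo = mid + 1
--
--     lo -= 1
--
--     L -= fL(lo)
--     R -= fR(lo)
--     steps = lo
--
--     if swapped:
--         L, R = R, L
--
--     return steps, L, R
-- ===== SOURCE B (Python) =====
-- def _isqrt(n):
--     # Newton's method integer square root (floor), n >= 1
--     if n == 0:
--         return 0
--     x = n
--     y = (x + n // x) // 2
--     while y < x:
--         x = y
--         y = (x + n // x) // 2
--     return x
--
-- def _take(k, want_odd, x):
--     # sum of the integers of one parity class in the range (k, x]
--     total = x * (x + 1) // 2 - k * (k + 1) // 2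
--     ev = (x // 2) * (x // 2 + 1) - (k // 2) * (k // 2 + 1)
--     return total - ev if want_odd else ev
--
-- def solve(L, R):
--     swapped = L < R
--     if swapped:
--         L, R = R, L
--     delta = L - R
--     # closed-form inversion of the triangular number: smallest k with k(k+1)/2 >= delta
--     s = _isqrt(8 * delta + 1)
--     k = (s - 1) // 2
--     if k * (k + 1) // 2 < delta:
--         k += 1
--     L -= k * (k + 1) // 2
--     if L < R or (L == R and swapped):
--         L, R = R, L
--         swapped = not swapped
--     lo, hi = 0, 5 * 10**9
--     while lo < hi:
--         mid = (lo + hi) // 2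
--         if _take(k, k % 2 == 0, mid) > L or _take(k, k % 2 == 1, mid) > R:
--             hi = mid
--         else:
--             lo = mid + 1
--     n = lo - 1
--     L -= _take(k, k % 2 == 0, n)
--     R -= _take(k, k % 2 == 1, n)
--     if swapped:
--         L, R = R, L
--     return n, L, R
-- ===== Notes on version B (the rewrite author's own statement) =====
-- stated objective: alternative
-- what changed: B replaces A's 33-iteration bisection that inverts the triangular number (tribsearch) with a Newton integer-square-root closed form plus one conditional correction, and fuses A's tri/even/odd parity helpers into a single _take helper; the second binary search is kept.
import Mathlib
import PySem

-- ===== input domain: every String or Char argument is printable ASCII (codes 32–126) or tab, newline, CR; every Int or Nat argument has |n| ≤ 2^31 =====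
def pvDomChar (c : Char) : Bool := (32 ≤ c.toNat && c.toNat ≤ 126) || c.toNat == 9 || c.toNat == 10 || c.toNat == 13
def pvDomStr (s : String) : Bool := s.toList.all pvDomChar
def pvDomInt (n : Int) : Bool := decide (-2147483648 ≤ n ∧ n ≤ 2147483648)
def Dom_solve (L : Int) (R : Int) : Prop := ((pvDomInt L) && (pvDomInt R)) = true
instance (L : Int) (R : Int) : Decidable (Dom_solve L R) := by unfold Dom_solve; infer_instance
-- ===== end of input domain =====

-- B replaces A's O(log) bisection for the triangular-number inversion by a Newton
-- integer-sqrt closed form with one conditional correction (objective: alternative).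

-- ===== PORT A =====
def tri (a b : Int) : Int :=
  let a := a - 1
  PySem.Int.floordiv (b * (b + 1)) 2 - PySem.Int.floordiv (a * (a + 1)) 2

def even (a b : Int) : Int :=
  let a := a - 1
  let a := PySem.Int.floordiv a 2
  let b := PySem.Int.floordiv b 2
  b * (b + 1) - a * (a + 1)

def odd (a b : Int) : Int := tri a b - even a b

-- while lo < hi of tribsearch
def tribsearchLoop (x lo hi : Int) : Int :=
  if h : lo < hi then
    let mid := PySem.Int.floordiv (lo + hi) 2
    if tri 1 mid ≥ x then tribsearchLoop x lo mid else tribsearchLoop x (mid + 1) hi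
  else hi
termination_by (hi - lo).toNat
decreasing_by
  · have := PySem.Int.floordiv_two_mid_bounds (le_of_lt h)
    have : PySem.Int.floordiv (lo + hi) 2 < hi := by
      rw [PySem.Int.floordiv_lt_iff_lt_mul (by norm_num)]; omega
    omega
  · have := PySem.Int.floordiv_two_mid_bounds (le_of_lt h)
    omega

def tribsearch (x : Int) : Int := tribsearchLoop x 0 5000000000

def fL (steps x : Int) : Int :=
  if PySem.Int.mod steps 2 = 0 then odd (steps + 1) x else even (steps + 1) x

def fR (steps x : Int) : Int :=
  if PySem.Int.mod steps 2 = 1 then odd (steps + 1) x else even (steps + 1) x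

-- second while lo < hi of solve
def solveLoop (steps L R lo hi : Int) : Int :=
  if h : lo < hi then
    let mid := PySem.Int.floordiv (lo + hi) 2
    if fL steps mid > L ∨ fR steps mid > R then solveLoop steps L R lo mid
    else solveLoop steps L R (mid + 1) hi
  else lo
termination_by (hi - lo).toNat
decreasing_by
  · have := PySem.Int.floordiv_two_mid_bounds (le_of_lt h)
    have : PySem.Int.floordiv (lo + hi) 2 < hi := by
      rw [PySem.Int.floordiv_lt_iff_lt_mul (by norm_num)]; omega
    omega
  · have := PySem.Int.floordiv_two_mid_bounds (le_of_lt h)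
    omega

def solve (L : Int) (R : Int) : Int × Int × Int :=
  let swapped := decide (L < R)
  let p := if L < R then (R, L) else (L, R)
  let L := p.1
  let R := p.2
  let steps : Int := 0
  let delta := L - R
  let k := tribsearch delta
  let steps := steps + k
  let L := L - tri 1 k
  let q := if L < R ∨ (L = R ∧ swapped = true) then (R, L, !swapped) else (L, R, swapped)
  let L := q.1
  let R := q.2.1
  let swapped := q.2.2
  let lo := solveLoop steps L R 0 5000000000
  let lo := lo - 1
  let L := L - fL steps lo
  let R := R - fR steps lo
  let steps := lo
  if swapped then (steps, R, L) else (steps, L, R)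

-- ===== PORT B =====
-- Newton integer-sqrt loop of Source B; the 0 ≤ y half of the guard only makes the
-- recursion well-founded (it holds on every reachable state, see isqrtLoop_spec).
def isqrtLoop (n x : Int) : Int :=
  let y := PySem.Int.floordiv (x + PySem.Int.floordiv n x) 2
  if h : 0 ≤ y ∧ y < x then isqrtLoop n y else x
termination_by x.toNat
decreasing_by omega

def isqrt (n : Int) : Int := if n = 0 then 0 else isqrtLoop n n

def take_ (k : Int) (wantOdd : Bool) (x : Int) : Int :=
  let total := PySem.Int.floordiv (x * (x + 1)) 2 - PySem.Int.floordiv (k * (k + 1)) 2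
  let ev := PySem.Int.floordiv x 2 * (PySem.Int.floordiv x 2 + 1) -
            PySem.Int.floordiv k 2 * (PySem.Int.floordiv k 2 + 1)
  if wantOdd then total - ev else ev

-- second while lo < hi of Source B's solve
def solveLoopB (k L R lo hi : Int) : Int :=
  if h : lo < hi then
    let mid := PySem.Int.floordiv (lo + hi) 2
    if take_ k (PySem.Int.mod k 2 = 0) mid > L ∨ take_ k (PySem.Int.mod k 2 = 1) mid > R then
      solveLoopB k L R lo mid
    else solveLoopB k L R (mid + 1) hi
  else lo
termination_by (hi - lo).toNat
decreasing_by
  · have := PySem.Int.floordiv_two_mid_bounds (le_of_lt h)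
    have : PySem.Int.floordiv (lo + hi) 2 < hi := by
      rw [PySem.Int.floordiv_lt_iff_lt_mul (by norm_num)]; omega
    omega
  · have := PySem.Int.floordiv_two_mid_bounds (le_of_lt h)
    omega

def solve_alt (L : Int) (R : Int) : Int × Int × Int :=
  let swapped := decide (L < R)
  let p := if L < R then (R, L) else (L, R)
  let L := p.1
  let R := p.2
  let delta := L - R
  let s := isqrt (8 * delta + 1)
  let k := PySem.Int.floordiv (s - 1) 2
  let k := if PySem.Int.floordiv (k * (k + 1)) 2 < delta then k + 1 else k
  let L := L - PySem.Int.floordiv (k * (k + 1)) 2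
  let q := if L < R ∨ (L = R ∧ swapped = true) then (R, L, !swapped) else (L, R, swapped)
  let L := q.1
  let R := q.2.1
  let swapped := q.2.2
  let lo := solveLoopB k L R 0 5000000000
  let n := lo - 1
  let L := L - take_ k (PySem.Int.mod k 2 = 0) n
  let R := R - take_ k (PySem.Int.mod k 2 = 1) n
  if swapped then (n, R, L) else (n, L, R)
-- ===== PRECONDITION & SPEC =====
def Spec_solve (L : Int) (R : Int) (out : Int × Int × Int) : Prop := out = solve_alt L R
instance (L : Int) (R : Int) (out : Int × Int × Int) : Decidable (Spec_solve L R out) := by unfold Spec_solve; infer_instance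

-- ===== CLAIM (what is proved, stated in full; the proofs are below) =====
def Claim_equal_solve : Prop := ∀ (L : Int) (R : Int), Dom_solve L R → Spec_solve L R (solve L R)

-- ===== LEMMAS AND PROOFS =====
-- tri with first argument 1
theorem tri1_eq (j : Int) : tri 1 j = PySem.Int.floordiv (j * (j + 1)) 2 := by
  simp [tri]

theorem two_mul_tri1 (j : Int) : 2 * tri 1 j = j * (j + 1) := by
  rw [tri1_eq]
  have hd : (2:Int) ∣ j * (j + 1) := (Int.even_mul_succ_self j).two_dvd
  have h1 := PySem.Int.floordiv_mul_add_mod (j * (j + 1)) 2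
  have h2 : PySem.Int.mod (j * (j + 1)) 2 = 0 :=
    (PySem.Int.mod_eq_zero_iff_dvd _ _).mpr hd
  linarith

theorem tri1_ge_iff (x j : Int) : x ≤ tri 1 j ↔ 2 * x ≤ j * (j + 1) := by
  have h := two_mul_tri1 j
  constructor <;> intro h' <;> linarith

theorem mono_mul_succ {a b : Int} (ha : 0 ≤ a) (hab : a ≤ b) : a * (a + 1) ≤ b * (b + 1) := by
  nlinarith

theorem tribsearchLoop_eq (x k : Int) (hk0 : 0 ≤ k) (hk : 2 * x ≤ k * (k + 1))
    (hbelow : ∀ j, 0 ≤ j → j < k → j * (j + 1) < 2 * x) :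
    ∀ n : ℕ, ∀ lo hi : Int, (hi - lo).toNat = n → 0 ≤ lo → lo ≤ k → k ≤ hi →
      tribsearchLoop x lo hi = k := by
  intro n
  induction n using Nat.strong_induction_on with
  | _ n ih =>
    intro lo hi hn h0 h1 h2
    rw [tribsearchLoop]
    split_ifs with hlt
    · have hmid := PySem.Int.floordiv_two_mid_bounds (le_of_lt hlt)
      have hmidlt : PySem.Int.floordiv (lo + hi) 2 < hi := by
        rw [PySem.Int.floordiv_lt_iff_lt_mul (by norm_num)]; omega
      set mid := PySem.Int.floordiv (lo + hi) 2 with hmdef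
      by_cases hc : x ≤ tri 1 mid
      · simp only [hc, ge_iff_le, if_pos]
        have hkm : k ≤ mid := by
          by_contra hkm
          push_neg at hkm
          have := hbelow mid (by omega) hkm
          have := (tri1_ge_iff x mid).mp hc
          omega
        exact ih (hi := mid) (lo := lo) (mid - lo).toNat (by omega) rfl h0 h1 hkm
      · simp only [ge_iff_le, hc, if_neg, not_false_iff]
        have hmk : mid < k := by
          by_contra hmk
          push_neg at hmk
          have hmono := mono_mul_succ hk0 hmk
          exact hc ((tri1_ge_iff x mid).mpr (by omega))
        exact ih (hi := hi) (lo := mid + 1) (hi - (mid + 1)).toNat (by omega) rfl (by omega) (by omega) h2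
    · omega


theorem isqrtLoop_spec (n : Int) (hn : 1 ≤ n) :
    ∀ m : ℕ, ∀ x : Int, x.toNat = m → 1 ≤ x → (∀ z, 0 ≤ z → z * z ≤ n → z ≤ x) →
      isqrtLoop n x * isqrtLoop n x ≤ n ∧ ∀ z, 0 ≤ z → z * z ≤ n → z ≤ isqrtLoop n x := by
  intro m
  induction m using Nat.strong_induction_on with
  | _ m ih =>
    intro x hm hx hub
    have hy : ∀ z, 0 ≤ z → z * z ≤ n →
        z ≤ PySem.Int.floordiv (x + PySem.Int.floordiv n x) 2 := by
      intro z hz hzn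
      rw [PySem.Int.le_floordiv_iff_mul_le (by norm_num)]
      by_contra hcon
      push_neg at hcon
      have h1 : PySem.Int.floordiv n x < 2 * z - x := by
        have h2 := PySem.Int.le_floordiv_iff_mul_le (a := n) (b := x) (q := 2 * z - x) (by omega)
        by_contra h3
        push_neg at h3
        have := h2.mp h3
        nlinarith
      have h4 := (PySem.Int.floordiv_lt_iff_lt_mul (a := n) (b := x) (q := 2 * z - x) (by omega)).mp h1
      nlinarith [mul_self_nonneg (z - x)]
    rw [isqrtLoop]
    set y := PySem.Int.floordiv (x + PySem.Int.floordiv n x) 2 with hydef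
    have hy1 : 1 ≤ y := hy 1 (by norm_num) (by linarith)
    split_ifs with hg
    · exact ih y.toNat (by omega) y rfl hy1 hy
    · have hxy : x ≤ y := by omega
      have hxn : x ≤ PySem.Int.floordiv n x := by
        rw [hydef, PySem.Int.le_floordiv_iff_mul_le (by norm_num)] at hxy
        omega
      rw [PySem.Int.le_floordiv_iff_mul_le (by omega)] at hxn
      exact ⟨by linarith, hub⟩

theorem isqrt_spec (n : Int) (hn : 1 ≤ n) :
    isqrt n * isqrt n ≤ n ∧ ∀ z, 0 ≤ z → z * z ≤ n → z ≤ isqrt n := by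
  rw [isqrt, if_neg (by omega)]
  exact isqrtLoop_spec n hn n.toNat n rfl hn
    (fun z hz hzn => by nlinarith [mul_self_nonneg (z - 1)])

-- the closed-form k of B equals A's tribsearch, for 0 ≤ δ ≤ 2^32
theorem closed_form_eq_tribsearch (d : Int) (hd0 : 0 ≤ d) (hd1 : d ≤ 4294967296) :
    (let s := isqrt (8 * d + 1)
     let k0 := PySem.Int.floordiv (s - 1) 2
     if PySem.Int.floordiv (k0 * (k0 + 1)) 2 < d then k0 + 1 else k0) = tribsearch d := by
  obtain ⟨hs1, hs2⟩ := isqrt_spec (8 * d + 1) (by omega)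
  set s := isqrt (8 * d + 1) with hsdef
  have hs0 : 1 ≤ s := hs2 1 (by norm_num) (by omega)
  have hsu : 8 * d + 1 < (s + 1) * (s + 1) := by
    by_contra hcon
    push_neg at hcon
    have := hs2 (s + 1) (by omega) hcon
    omega
  set k0 := PySem.Int.floordiv (s - 1) 2 with hk0def
  have hfm := PySem.Int.floordiv_mul_add_mod (s - 1) 2
  have hm0 := PySem.Int.mod_nonneg (s - 1) (b := 2) (by norm_num)
  have hm1 := PySem.Int.mod_lt (s - 1) (b := 2) (by norm_num)
  have hk0r : 2 * k0 ≤ s - 1 ∧ s - 1 ≤ 2 * k0 + 1 := by omega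
  have hk00 : 0 ≤ k0 := by omega
  -- always: k0(k0+1) ≤ 2d
  have hlow : k0 * (k0 + 1) ≤ 2 * d := by nlinarith
  -- the bump condition is k0(k0+1) < 2d
  have hcond : PySem.Int.floordiv (k0 * (k0 + 1)) 2 < d ↔ k0 * (k0 + 1) < 2 * d := by
    have h2 := two_mul_tri1 k0
    rw [tri1_eq] at h2
    omega
  -- bound on s, hence on k
  have hsb : s ≤ 300000 := by nlinarith
  show (if PySem.Int.floordiv (k0 * (k0 + 1)) 2 < d then k0 + 1 else k0) = tribsearch d
  split_ifs with hb
  · -- bump: k = k0 + 1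
    rw [hcond] at hb
    have hk : 2 * d ≤ (k0 + 1) * ((k0 + 1) + 1) := by nlinarith
    exact (tribsearchLoop_eq d (k0 + 1) (by omega) hk
      (fun j hj0 hjk => by nlinarith [mono_mul_succ hj0 (by omega : j ≤ k0)])
      ((5000000000:Int) - 0).toNat 0 5000000000 rfl le_rfl (by omega) (by omega)).symm
  · -- no bump: k = k0
    rw [hcond] at hb
    push_neg at hb
    exact (tribsearchLoop_eq d k0 hk00 hb
      (fun j hj0 hjk => by nlinarith [mono_mul_succ hj0 (by omega : j ≤ k0 - 1)])
      ((5000000000:Int) - 0).toNat 0 5000000000 rfl le_rfl (by omega) (by omega)).symm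

theorem fL_eq (k x : Int) : fL k x = take_ k (decide (PySem.Int.mod k 2 = 0)) x := by
  by_cases h : PySem.Int.mod k 2 = 0 <;> simp [fL, take_, odd, tri, even, h]

theorem fR_eq (k x : Int) : fR k x = take_ k (decide (PySem.Int.mod k 2 = 1)) x := by
  by_cases h : PySem.Int.mod k 2 = 1 <;> simp [fR, take_, odd, tri, even, h]

theorem solveLoopB_eq_aux (k L R : Int) : ∀ n : ℕ, ∀ lo hi : Int, (hi - lo).toNat = n →
    solveLoopB k L R lo hi = solveLoop k L R lo hi := by
  intro n
  induction n using Nat.strong_induction_on with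
  | _ n ih =>
    intro lo hi hn
    by_cases hlt : lo < hi
    · have hmid := PySem.Int.floordiv_two_mid_bounds (le_of_lt hlt)
      have hmidlt : PySem.Int.floordiv (lo + hi) 2 < hi := by
        rw [PySem.Int.floordiv_lt_iff_lt_mul (by norm_num)]; omega
      rw [solveLoopB, solveLoop, dif_pos hlt, dif_pos hlt]
      simp only [← fL_eq, ← fR_eq]
      split_ifs with hc
      · exact ih (PySem.Int.floordiv (lo + hi) 2 - lo).toNat (by omega) _ _ rfl
      · exact ih (hi - (PySem.Int.floordiv (lo + hi) 2 + 1)).toNat (by omega) _ _ rfl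
    · rw [solveLoopB, solveLoop, dif_neg hlt, dif_neg hlt]

theorem solveLoopB_eq (k L R lo hi : Int) : solveLoopB k L R lo hi = solveLoop k L R lo hi :=
  solveLoopB_eq_aux k L R (hi - lo).toNat lo hi rfl

theorem closed_form_eq_tribsearch' (d : Int) (hd0 : 0 ≤ d) (hd1 : d ≤ 4294967296) :
    (if PySem.Int.floordiv
          (PySem.Int.floordiv (isqrt (8 * d + 1) - 1) 2 *
            (PySem.Int.floordiv (isqrt (8 * d + 1) - 1) 2 + 1)) 2 < d
      then PySem.Int.floordiv (isqrt (8 * d + 1) - 1) 2 + 1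
      else PySem.Int.floordiv (isqrt (8 * d + 1) - 1) 2) = tribsearch d :=
  closed_form_eq_tribsearch d hd0 hd1


-- ===== VERDICT (by name: the statement is the Claim_ definition above) =====
theorem solve_spec : Claim_equal_solve := by
  intro L R hdom
  simp only [Dom_solve, pvDomInt, Bool.and_eq_true, decide_eq_true_eq] at hdom
  show solve L R = solve_alt L R
  by_cases hLR : L < R
  · simp only [solve, solve_alt, if_pos hLR, zero_add, tri1_eq, fL_eq, fR_eq, solveLoopB_eq]
    rw [closed_form_eq_tribsearch' (R - L) (by omega) (by omega)]
  · simp only [solve, solve_alt, if_neg hLR, zero_add, tri1_eq, fL_eq, fR_eq, solveLoopB_eq]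
    rw [closed_form_eq_tribsearch' (L - R) (by omega) (by omega)]
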